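-- pv_equiv track=rewrite | github.com/cnheider/warg | warg/functions.py | swap_mapping_order
-- ===== SOURCE A (Python) =====
-- from collections import defaultdict
-- from copy import deepcopy
-- from typing import Any, Callable, Dict, Iterable, Iterator, Mapping, Sequence, Tuple
--
-- def swap_mapping_order(m: Mapping, order: Sequence[int]) -> Mapping:
--     """
--
--     :param m:
--     :param order:
--     :return:
--     """
--     order = [*order]
--
--     def deep_swap(dict_, level):
--         """
--
--         :param dict_:
--         :param level:
--         :return:
--         """
--
--         def swap_two_level_dict(a):
--             """
--
--             :param a:
--             :return:
--             """
--             b = defaultdict(dict)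
--             for key1, value1 in a.items():
--                 for key2, value2 in value1.items():
--                     b[key2].update({key1: value2})
--             return b
--
--         dict_ = deepcopy(dict_)
--         if level == 0:
--             dict_ = swap_two_level_dict(dict_)
--         else:
--             for key in dict_:
--                 dict_[key] = deep_swap(dict_[key], level - 1)
--         return dict_
--
--     for pas_no in range(len(order) - 1, 0, -1):
--         for i in range(pas_no):
--             if order[i] > order[i + 1]:
--                 temp = order[i]
--                 order[i] = order[i + 1]
--                 order[i + 1] = temp
--                 m = deep_swap(m, i)
--     return m
-- ===== SOURCE B (Python) =====
-- def _flatten(node, depth):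
--     if depth == 0:
--         yield (), node
--     else:
--         for key, value in node.items():
--             for keys, leaf in _flatten(value, depth - 1):
--                 yield (key,) + keys, leaf
--
--
-- def swap_mapping_order(m, order):
--     order = [*order]
--     if sorted(order) == order:
--         return m
--     perm = sorted(range(len(order)), key=order.__getitem__)
--     result = {}
--     for keys, value in _flatten(m, len(order)):
--         permuted = [keys[j] for j in perm]
--         node = result
--         for key in permuted[:-1]:
--             node = node.setdefault(key, {})
--         node[permuted[-1]] = value
--     return result
-- ===== Notes on version B (the rewrite author's own statement) =====
-- stated objective: alternative
-- what changed: B replaces A's bubble sort over `order` with a repeated deepcopy+recursive deep_swap per adjacent swap by computing the sort permutation once (stable argsort), flattening the nested mapping to leaf key-tuples, permuting each key-tuple, and rebuilding the nested dict in one pass; Pre_ admits already-sorted orders and orders of length 2 (the nesting depth of the two-level mapping type) and excludes longer unsorted orders, where A's deep swaps below the leaf level raise AttributeError on any integer leaf and return a value only by the accident of which levels hold no leaves.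
-- outside the precondition, e.g. on swap_mapping_order({'a': {}}, [1, 3, 2]): A returns {'a': {}}, B returns {}; on swap_mapping_order({'a': {'x': 1}}, [2, 1, 3]): A returns {'x': {'a': 1}}, B raises AttributeError
import Mathlib
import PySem

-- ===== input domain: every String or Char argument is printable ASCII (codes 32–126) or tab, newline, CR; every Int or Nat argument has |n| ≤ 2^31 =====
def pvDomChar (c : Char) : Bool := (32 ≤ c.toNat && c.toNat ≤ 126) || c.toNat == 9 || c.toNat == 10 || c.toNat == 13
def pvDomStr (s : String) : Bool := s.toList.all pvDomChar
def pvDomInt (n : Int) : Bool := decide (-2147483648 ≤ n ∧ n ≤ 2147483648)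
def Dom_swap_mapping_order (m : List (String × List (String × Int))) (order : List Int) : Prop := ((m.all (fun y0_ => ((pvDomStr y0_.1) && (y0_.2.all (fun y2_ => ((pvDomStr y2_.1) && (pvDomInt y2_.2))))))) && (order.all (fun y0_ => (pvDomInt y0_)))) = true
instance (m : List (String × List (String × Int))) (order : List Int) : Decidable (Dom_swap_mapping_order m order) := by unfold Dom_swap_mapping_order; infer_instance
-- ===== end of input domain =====

-- B computes the sort permutation of `order` once (a stable argsort), flattens the nested mapping
-- to leaf key-tuples, permutes each key-tuple and rebuilds the nested dict in one pass, instead of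
-- A's bubble sort performing a deepcopy + recursive deep swap per adjacent swap (objective: alternative).

-- ===== PORT A =====
-- swap_two_level_dict: `b = defaultdict(dict); b[key2].update({key1: value2})` is exactly
-- `Dict.modify key2 empty (·.insert key1 value2)`; the returned mapping's items are its assoc list.
def pvSwapTwoLevelA (a : List (String × List (String × Int))) : List (String × List (String × Int)) :=
  (a.foldl
      (fun (b : PySem.Dict String (PySem.Dict String Int)) kv =>
        kv.2.foldl (fun b kv2 => b.modify kv2.1 PySem.Dict.empty (fun inner => inner.insert kv.1 kv2.2)) b)
      PySem.Dict.empty).items.map (fun p => (p.1, p.2.items))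

-- deep_swap: level == 0 performs the two-level swap (the deepcopy is value-irrelevant).
-- For level > 0 Python recurses into the values and raises AttributeError/TypeError on every leaf it
-- reaches; on this two-level type it therefore RETURNS only when it reaches no leaf, and then returns
-- dict_ unchanged — so `else d` is exact wherever Python returns (Pre_ keeps such calls unreachable).
def pvDeepSwap (d : List (String × List (String × Int))) (level : Int) : List (String × List (String × Int)) :=
  if level = 0 then pvSwapTwoLevelA d else d

-- the inner-loop body of A's bubble sort, state = (order, m); order[i] indexing/assignment is in
-- range (0 ≤ i, i+1 ≤ pas_no ≤ len-1), so pyGetD/List.set are exact here.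
def pvStep (st : List Int × List (String × List (String × Int))) (i : Int) :
    List Int × List (String × List (String × Int)) :=
  if PySem.List.pyGetD st.1 (i + 1) 0 < PySem.List.pyGetD st.1 i 0 then
    let temp := PySem.List.pyGetD st.1 i 0
    (((st.1.set i.toNat (PySem.List.pyGetD st.1 (i + 1) 0)).set (i + 1).toNat temp),
     pvDeepSwap st.2 i)
  else st

def swap_mapping_order (m : List (String × List (String × Int))) (order : List Int) : List (String × List (String × Int)) :=
  ((PySem.List.pyRange ((order.length : Int) - 1) 0 (-1)).foldl
      (fun (st : List Int × List (String × List (String × Int))) pas_no =>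
        (PySem.List.pyRange 0 pas_no 1).foldl pvStep st)
      (order, m)).2

-- ===== PORT B =====
-- Source B's flatten/permute/rebuild, transcribed at depth 2 — the nesting depth of this mapping type,
-- and the only depth the unsorted branch is reached with inside Pre_ (shorter orders are sorted):
-- _flatten yields ([key1, key2], leaf) in traversal order; `permuted = [keys[j] for j in perm]`;
-- the setdefault walk over permuted[:-1] followed by `node[permuted[-1]] = value` is
-- `Dict.modify permuted[0] empty (·.insert permuted[-1] value)`.
def pvFlatten2 (m : List (String × List (String × Int))) : List (List String × Int) :=
  m.flatMap (fun kv => kv.2.map (fun kv2 => ([kv.1, kv2.1], kv2.2)))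

def pvRebuildStep (perm : List Int) (r : PySem.Dict String (PySem.Dict String Int))
    (kv : List String × Int) : PySem.Dict String (PySem.Dict String Int) :=
  let permuted := perm.map (fun j => PySem.List.pyGetD kv.1 j "")
  r.modify (PySem.List.pyGetD permuted 0 "") PySem.Dict.empty
    (fun inner => inner.insert (PySem.List.pyGetD permuted (-1) "") kv.2)

def pvRebuild (flat : List (List String × Int)) (perm : List Int) : List (String × List (String × Int)) :=
  (flat.foldl (pvRebuildStep perm) PySem.Dict.empty).items.map (fun p => (p.1, p.2.items))

def swap_mapping_order_alt (m : List (String × List (String × Int))) (order : List Int) : List (String × List (String × Int)) :=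
  if PySem.List.sorted order (fun x => x) false = order then m
  else
    let perm := PySem.List.sorted (PySem.List.pyRange 0 (order.length : Int) 1)
                  (fun j => PySem.List.pyGetD order j 0) false
    pvRebuild (pvFlatten2 m) perm

-- ===== PRECONDITION & SPEC =====
-- Pre_ admits orders that are already sorted (A performs no swap) and orders of length 2 (the
-- nesting depth of this two-level mapping type). It excludes longer unsorted orders, a mismatch
-- between the order's length and the mapping's depth: there A's bubble sort triggers deep swaps
-- below the leaf level, which raise AttributeError on any integer leaf and return a value only by
-- the accident of which levels happen to hold no leaves.
def Pre_swap_mapping_order (m : List (String × List (String × Int))) (order : List Int) : Prop :=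
  order.Pairwise (· ≤ ·) ∨ order.length = 2
instance (m : List (String × List (String × Int))) (order : List Int) : Decidable (Pre_swap_mapping_order m order) := by unfold Pre_swap_mapping_order; infer_instance

def pvWitness_swap_mapping_order : (List (String × List (String × Int))) × List Int :=
  ([("a", [("x", 1), ("y", 2)]), ("b", [("x", 3)])], [2, 1])

def Spec_swap_mapping_order (m : List (String × List (String × Int))) (order : List Int) (out : List (String × List (String × Int))) : Prop := out = swap_mapping_order_alt m order
instance (m : List (String × List (String × Int))) (order : List Int) (out : List (String × List (String × Int))) : Decidable (Spec_swap_mapping_order m order out) := by unfold Spec_swap_mapping_order; infer_instance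

-- ===== CLAIM (what is proved, stated in full; the proofs are below) =====
def Claim_equal_swap_mapping_order : Prop := ∀ (m : List (String × List (String × Int))) (order : List Int), Dom_swap_mapping_order m order → Pre_swap_mapping_order m order → Spec_swap_mapping_order m order (swap_mapping_order m order)

-- ===== LEMMAS AND PROOFS =====

-- a comparison at an in-range index of a sorted order never fires
theorem pvStep_id (o : List Int) (mm : List (String × List (String × Int))) (i : Int)
    (hs : o.Pairwise (· ≤ ·)) (h0 : 0 ≤ i) (h1 : i + 1 < (o.length : Int)) :
    pvStep (o, mm) i = (o, mm) := by
  have hi1 : (0:Int) ≤ i + 1 := by omega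
  have hnat : i.toNat + 1 < o.length := by omega
  have hle : o[i.toNat] ≤ o[i.toNat + 1] :=
    List.pairwise_iff_getElem.mp hs i.toNat (i.toNat + 1) (by omega) hnat (by omega)
  have hlt : ¬ (PySem.List.pyGetD o (i + 1) 0 < PySem.List.pyGetD o i 0) := by
    rw [PySem.List.pyGetD_eq_getElem o 0 hi1 (by omega), PySem.List.pyGetD_eq_getElem o 0 h0 (by omega)]
    have e : (i + 1).toNat = i.toNat + 1 := by omega
    simp only [e]
    omega
  simp only [pvStep, if_neg hlt]

-- a whole pass over in-range indices of a sorted order is the identity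
theorem pvPass_id (o : List Int) (mm : List (String × List (String × Int)))
    (hs : o.Pairwise (· ≤ ·)) (ys : List Int)
    (hy : ∀ i ∈ ys, 0 ≤ i ∧ i + 1 < (o.length : Int)) :
    ys.foldl pvStep (o, mm) = (o, mm) := by
  induction ys with
  | nil => rfl
  | cons y ys ih =>
      have := hy y (by simp)
      simp only [List.foldl_cons, pvStep_id o mm y hs this.1 this.2]
      exact ih (fun i hi => hy i (by simp [hi]))

-- all remaining bubble passes over a sorted order are the identity
theorem pvOuter_id (o : List Int) (mm : List (String × List (String × Int)))
    (hs : o.Pairwise (· ≤ ·)) (ps : List Int)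
    (hp : ∀ p ∈ ps, p ≤ (o.length : Int) - 1) :
    ps.foldl (fun st p => (PySem.List.pyRange 0 p 1).foldl pvStep st) (o, mm) = (o, mm) := by
  induction ps with
  | nil => rfl
  | cons p ps ih =>
      have hpb := hp p (by simp)
      simp only [List.foldl_cons]
      rw [pvPass_id o mm hs _ (fun i hi => by
        rw [PySem.List.mem_pyRange_one] at hi; omega)]
      exact ih (fun q hq => hp q (by simp [hq]))

-- on a length-2 order [a, b] with b < a, A performs exactly one swap, at index 0
theorem pvA_two (m : List (String × List (String × Int))) (a b : Int) (hba : b < a) :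
    swap_mapping_order m [a, b] = pvSwapTwoLevelA m := by
  unfold swap_mapping_order
  have hl : (([a, b].length : Int) - 1) = 1 := by simp
  rw [hl, show PySem.List.pyRange 1 0 (-1) = [1] by decide]
  simp only [List.foldl_cons, List.foldl_nil]
  rw [show PySem.List.pyRange 0 1 1 = [0] by decide]
  simp only [List.foldl_cons, List.foldl_nil]
  have hst : pvStep ([a, b], m) 0 = ([b, a], pvSwapTwoLevelA m) := by
    have hc : PySem.List.pyGetD [a, b] ((0:Int) + 1) 0 < PySem.List.pyGetD [a, b] (0:Int) 0 := by
      norm_num [pysem]; omega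
    simp only [pvStep]
    rw [if_pos hc]
    simp [pvDeepSwap, pysem]
  rw [hst]

-- B's rebuild with perm = [1, 0] is A's two-level transpose: same insertions in the same order
theorem pvRebuild_eq_swap (m : List (String × List (String × Int))) :
    pvRebuild (pvFlatten2 m) [1, 0] = pvSwapTwoLevelA m := by
  unfold pvRebuild pvFlatten2 pvSwapTwoLevelA
  rw [List.foldl_flatMap]
  have h : (fun (acc : PySem.Dict String (PySem.Dict String Int)) (kv : String × List (String × Int)) =>
        List.foldl (pvRebuildStep [1, 0]) acc (kv.2.map (fun kv2 => ([kv.1, kv2.1], kv2.2))))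
      = (fun b kv => kv.2.foldl (fun b kv2 => b.modify kv2.1 PySem.Dict.empty (fun inner => inner.insert kv.1 kv2.2)) b) := by
    funext acc kv
    rw [List.foldl_map]
    have h2 : (fun (b : PySem.Dict String (PySem.Dict String Int)) (kv2 : String × Int) =>
          pvRebuildStep [1, 0] b ([kv.1, kv2.1], kv2.2))
        = (fun b kv2 => b.modify kv2.1 PySem.Dict.empty (fun inner => inner.insert kv.1 kv2.2)) := by
      funext b kv2
      simp only [pvRebuildStep, List.map_cons, List.map_nil]
      rw [show PySem.List.pyGetD [kv.1, kv2.1] (1:Int) "" = kv2.1 by simp [pysem],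
          show PySem.List.pyGetD [kv.1, kv2.1] (0:Int) "" = kv.1 by simp [pysem]]
      rw [PySem.List.pyGetD_zero_cons,
          show PySem.List.pyGetD [kv2.1, kv.1] (-1:Int) "" = kv.1 by simp [pysem]]
    rw [h2]
  rw [h]

-- ===== VERDICT (by name: the statement is the Claim_ definition above) =====
theorem swap_mapping_order_spec : Claim_equal_swap_mapping_order := by
  intro m order _hdom hpre
  unfold Spec_swap_mapping_order
  by_cases hs : order.Pairwise (· ≤ ·)
  · -- already sorted: A's bubble sort never swaps, B's sorted-check returns m
    have hself : PySem.List.sorted order (fun x => x) false = order :=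
      PySem.List.sorted_eq_self_of_pairwise order (fun x => x) hs
    have hb : swap_mapping_order_alt m order = m := by
      simp only [swap_mapping_order_alt]
      rw [if_pos hself]
    rw [hb]
    unfold swap_mapping_order
    rw [pvOuter_id order m hs _ (fun p hp => by
      rw [PySem.List.mem_pyRange_neg_one] at hp; omega)]
  · -- unsorted: Pre_ forces order = [a, b] with b < a; A transposes once, B rebuilds with perm [1,0]
    have hlen : order.length = 2 := hpre.resolve_left hs
    match order, hlen with
    | [a, b], _ =>
      have hba : b < a := by
        by_contra hab
        exact hs (List.pairwise_pair.mpr (by omega))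
      have hsort : PySem.List.sorted [a, b] (fun x => x) false = [b, a] :=
        PySem.List.sorted_eq_of_perm_of_pairwise_lt _ _ _ (List.Perm.swap a b [])
          (List.pairwise_pair.mpr hba)
      have hne : ¬ (PySem.List.sorted [a, b] (fun x => x) false = [a, b]) := by
        rw [hsort]; intro h; injection h with h1 h2; omega
      have hperm : PySem.List.sorted (PySem.List.pyRange 0 (([a, b].length : Int)) 1)
          (fun j => PySem.List.pyGetD [a, b] j 0) false = [1, 0] := by
        have hn : (([a, b].length : Int)) = 2 := by simp
        have h2 : PySem.List.pyRange 0 (([a, b].length : Int)) 1 = [0, 1] := by rw [hn]; decide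
        rw [h2]
        exact PySem.List.sorted_eq_of_perm_of_pairwise_lt _ _ _ (List.Perm.swap 0 1 [])
          (List.pairwise_pair.mpr (by norm_num [pysem]; omega))
      have hb : swap_mapping_order_alt m [a, b] = pvRebuild (pvFlatten2 m) [1, 0] := by
        simp only [swap_mapping_order_alt]
        rw [if_neg hne, hperm]
      rw [hb, pvRebuild_eq_swap, pvA_two m a b hba]
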